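-- pv_equiv track=rewrite | github.com/BaxterHill06/Entertainment-Assistant_Python | CODE/functions.py | GenreSearch
-- ===== SOURCE A (Python) =====
-- def GenreSearch(libGenre, inGenre):
--     libGenreSplit = libGenre.split("/") # split the genre into two if there are 2
--     inGenreSplit = inGenre.split("/") # split the genre into two if there are 2
--
--     score = 0 # set score to 0
--
--     for inMovie in inGenreSplit: # loop through the genres entered
--         for libMovie in libGenreSplit: # loop through the genres of the movie
--             if inMovie.lower() == libMovie.lower():
--                 score += 2 # add two points if the genre is the same
--
--     return score
-- ===== SOURCE B (Python) =====
-- def GenreSearch(libGenre, inGenre):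
--     # Sort-and-merge: sort both lowercased token lists, then one linear merge
--     # scores each shared value as 2 * (run length in one) * (run length in the other).
--     la = sorted(g.lower() for g in inGenre.split("/"))
--     lb = sorted(g.lower() for g in libGenre.split("/"))
--     score = 0
--     i = j = 0
--     while i < len(la) and j < len(lb):
--         if la[i] < lb[j]:
--             i += 1
--         elif lb[j] < la[i]:
--             j += 1
--         else:
--             v = la[i]
--             ci = 0
--             while i < len(la) and la[i] == v:
--                 i += 1
--                 ci += 1
--             cj = 0
--             while j < len(lb) and lb[j] == v:
--                 j += 1
--                 cj += 1
--             score += 2 * ci * cj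
--     return score
-- ===== Notes on version B (the rewrite author's own statement) =====
-- stated objective: alternative
-- what changed: Replaced A's nested pairwise scan with sort-and-merge: both lowercased token lists are sorted, then a single linear merge scores each shared value as 2 * (run length in one list) * (run length in the other).
import Mathlib
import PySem

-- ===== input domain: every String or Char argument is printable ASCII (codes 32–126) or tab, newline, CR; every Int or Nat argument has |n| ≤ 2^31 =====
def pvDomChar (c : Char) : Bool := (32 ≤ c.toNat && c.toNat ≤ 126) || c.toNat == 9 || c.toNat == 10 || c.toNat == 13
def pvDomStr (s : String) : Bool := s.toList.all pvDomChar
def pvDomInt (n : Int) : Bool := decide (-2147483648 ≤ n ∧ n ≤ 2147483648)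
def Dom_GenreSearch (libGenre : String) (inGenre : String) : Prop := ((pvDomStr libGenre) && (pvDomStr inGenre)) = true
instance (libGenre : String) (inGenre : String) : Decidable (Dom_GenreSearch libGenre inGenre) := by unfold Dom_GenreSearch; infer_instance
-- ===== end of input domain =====

-- B sorts the two lowercased token lists and scores them by a single linear merge,
-- adding 2 * (run length left) * (run length right) per shared value — a different
-- algorithm (sort + merge) from A's nested pairwise scan, same result (alternative).

-- s.split("/") — sep is the nonempty literal "/", so Python never raises; split? is some here.
def pySplitSlash (s : String) : List String := (PySem.Str.split? s "/").getD []

-- ===== PORT A =====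
def GenreSearch (libGenre : String) (inGenre : String) : Int :=
  let libGenreSplit := pySplitSlash libGenre
  let inGenreSplit := pySplitSlash inGenre
  inGenreSplit.foldl (fun score inMovie =>
    libGenreSplit.foldl (fun score libMovie =>
      if PySem.Str.lower inMovie == PySem.Str.lower libMovie then score + 2 else score)
      score) (0 : Int)

-- ===== PORT B =====
-- B's merge loop: the two inner `while` runs that consume a block of equal tokens are
-- the takeWhile/dropWhile span of the run (ci/cj are the run lengths).
def mergeScore : List String → List String → Int
  | [], _ => 0
  | _ :: _, [] => 0
  | a :: as, b :: bs =>
    if a < b then mergeScore as (b :: bs)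
    else if b < a then mergeScore (a :: as) bs
    else
      let ci : Int := 1 + (as.takeWhile (· == a)).length
      let cj : Int := 1 + (bs.takeWhile (· == a)).length
      2 * ci * cj + mergeScore (as.dropWhile (· == a)) (bs.dropWhile (· == a))
termination_by la lb => la.length + lb.length
decreasing_by
  all_goals
    (try have h1 := List.length_dropWhile_le (p := (· == a)) (l := as));
    (try have h2 := List.length_dropWhile_le (p := (· == a)) (l := bs));
    simp only [List.length_cons]; omega

def GenreSearch_alt (libGenre : String) (inGenre : String) : Int :=
  let la := PySem.List.sorted ((pySplitSlash inGenre).map PySem.Str.lower) (fun x => x) false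
  let lb := PySem.List.sorted ((pySplitSlash libGenre).map PySem.Str.lower) (fun x => x) false
  mergeScore la lb

-- ===== PRECONDITION & SPEC =====
def Spec_GenreSearch (libGenre : String) (inGenre : String) (out : Int) : Prop := out = GenreSearch_alt libGenre inGenre
instance (libGenre : String) (inGenre : String) (out : Int) : Decidable (Spec_GenreSearch libGenre inGenre out) := by unfold Spec_GenreSearch; infer_instance

-- ===== CLAIM (what is proved, stated in full; the proofs are below) =====
def Claim_equal_GenreSearch : Prop := ∀ (libGenre : String) (inGenre : String), Dom_GenreSearch libGenre inGenre → Spec_GenreSearch libGenre inGenre (GenreSearch libGenre inGenre)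

-- ===== LEMMAS AND PROOFS =====

-- A's inner loop over the library tokens adds 2 per case-insensitive match,
-- i.e. 2 * the count of the lowered token among the lowered library tokens.
theorem inner_loop_eq_count (lib : List String) (t : String) (s : Int) :
    lib.foldl (fun score libMovie =>
      if PySem.Str.lower t == PySem.Str.lower libMovie then score + 2 else score) s
      = s + 2 * ((lib.map PySem.Str.lower).count (PySem.Str.lower t) : Int) := by
  induction lib generalizing s with
  | nil => simp
  | cons x xs ih =>
    simp only [List.foldl_cons, List.map_cons, List.count_cons, ih]
    by_cases h : PySem.Str.lower t = PySem.Str.lower x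
    · simp [h]; ring
    · simp [h, Ne.symm h]

-- Elements surviving the dropWhile of a run of a's in a sorted list are strictly above a.
theorem dropWhile_gt (a : String) : ∀ (l : List String), l.Pairwise (· ≤ ·) →
    (∀ x ∈ l, a ≤ x) → ∀ x ∈ l.dropWhile (· == a), a < x := by
  intro l
  induction l with
  | nil => intro _ _ x hx; simp at hx
  | cons h t ih =>
    intro hp hall x hx
    have hp' := List.pairwise_cons.1 hp
    by_cases hha : (h == a) = true
    · rw [List.dropWhile_cons, if_pos hha] at hx
      have ha' : h = a := by simpa using hha
      exact ih hp'.2 (fun y hy => ha' ▸ hp'.1 y hy) x hx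
    · rw [List.dropWhile_cons, if_neg hha] at hx
      have hne : h ≠ a := fun he => hha (by simp [he])
      have hah : a < h := lt_of_le_of_ne (hall h (by simp)) (Ne.symm hne)
      simp only [List.mem_cons] at hx
      rcases hx with rfl | hx
      · exact hah
      · exact lt_of_lt_of_le hah (hp'.1 x hx)


-- On sorted lists, B's merge computes 2 * the number of equal pairs,
-- i.e. 2 * Σ_{x ∈ la} (count of x in lb).
theorem mergeScore_eq_sum : ∀ (n : Nat) (la lb : List String), la.length + lb.length = n →
    la.Pairwise (· ≤ ·) → lb.Pairwise (· ≤ ·) →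
    mergeScore la lb = 2 * (la.map (fun x => ((lb.count x : Nat) : Int))).sum := by
  intro n
  induction n using Nat.strong_induction_on with
  | _ n ih =>
    intro la lb hn ha hb
    cases la with
    | nil => simp [mergeScore]
    | cons a as =>
      cases lb with
      | nil => simp [mergeScore]
      | cons b bs =>
        have ha' := List.pairwise_cons.1 ha
        have hb' := List.pairwise_cons.1 hb
        rw [mergeScore]
        rcases lt_trichotomy a b with hab | hab | hab
        · rw [if_pos hab]
          have hnotmem : a ∉ b :: bs := by
            intro hm
            rcases List.mem_cons.1 hm with rfl | hm
            · exact lt_irrefl a hab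
            · exact absurd (lt_of_lt_of_le hab (hb'.1 a hm)) (lt_irrefl a)
          have hcnt : (b :: bs).count a = 0 := List.count_eq_zero.2 hnotmem
          have hrec := ih (as.length + (b :: bs).length) (by simp at hn ⊢; omega)
            as (b :: bs) rfl ha'.2 hb
          simp [hrec, hcnt]
        · subst hab
          rw [if_neg (lt_irrefl a), if_neg (lt_irrefl a)]
          dsimp only
          have hta : ∀ x ∈ as.takeWhile (· == a), x = a := fun x hx => by
            simpa using List.mem_takeWhile_imp hx
          have htb : ∀ x ∈ bs.takeWhile (· == a), x = a := fun x hx => by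
            simpa using List.mem_takeWhile_imp hx
          have has' : ∀ x ∈ as.dropWhile (· == a), a < x := dropWhile_gt a as ha'.2 ha'.1
          have hbs' : ∀ x ∈ bs.dropWhile (· == a), a < x := dropWhile_gt a bs hb'.2 hb'.1
          have hpas' := ha'.2.sublist (List.dropWhile_sublist (· == a) (l := as))
          have hpbs' := hb'.2.sublist (List.dropWhile_sublist (· == a) (l := bs))
          have hlen1 := List.length_dropWhile_le (p := (· == a)) (l := as)
          have hlen2 := List.length_dropWhile_le (p := (· == a)) (l := bs)
          have hrec := ih ((as.dropWhile (· == a)).length + (bs.dropWhile (· == a)).length)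
            (by simp at hn; omega) _ _ rfl hpas' hpbs'
          rw [hrec]
          have hsplit_as : as = as.takeWhile (· == a) ++ as.dropWhile (· == a) :=
            (List.takeWhile_append_dropWhile).symm
          have hsplit_bs : bs = bs.takeWhile (· == a) ++ bs.dropWhile (· == a) :=
            (List.takeWhile_append_dropWhile).symm
          have hcount_a : (a :: bs).count a = 1 + (bs.takeWhile (· == a)).length := by
            rw [List.count_cons_self]
            conv_lhs => rw [hsplit_bs]
            rw [List.count_append]
            have h1 : (bs.takeWhile (· == a)).count a = (bs.takeWhile (· == a)).length :=
              List.count_eq_length.2 (fun x hx => (htb x hx).symm)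
            have h2 : (bs.dropWhile (· == a)).count a = 0 :=
              List.count_eq_zero.2 (fun hm => lt_irrefl a (hbs' a hm))
            omega
          have hcount_x : ∀ x ∈ as.dropWhile (· == a),
              (a :: bs).count x = (bs.dropWhile (· == a)).count x := by
            intro x hx
            have hax : a < x := has' x hx
            rw [List.count_cons]
            conv_lhs => rw [hsplit_bs]
            rw [List.count_append]
            have h1 : (bs.takeWhile (· == a)).count x = 0 :=
              List.count_eq_zero.2 (fun hm => ne_of_gt hax (htb x hm))
            simp [h1, ne_of_lt hax]
          conv_rhs => rw [List.map_cons, List.sum_cons, hsplit_as, List.map_append, List.sum_append]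
          have hsum_ta : ((as.takeWhile (· == a)).map
              (fun x => (((a :: bs).count x : Nat) : Int))).sum
              = (as.takeWhile (· == a)).length * (((a :: bs).count a : Nat) : Int) := by
            rw [List.map_congr_left (l := as.takeWhile (· == a))
              (g := fun _ => (((a :: bs).count a : Nat) : Int)) (fun x hx => by rw [hta x hx])]
            rw [List.map_const', List.sum_replicate, nsmul_eq_mul]
          have hsum_as' : ((as.dropWhile (· == a)).map
              (fun x => (((a :: bs).count x : Nat) : Int))).sum
              = ((as.dropWhile (· == a)).map
                  (fun x => (((bs.dropWhile (· == a)).count x : Nat) : Int))).sum := by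
            apply congrArg
            exact List.map_congr_left (fun x hx => by rw [hcount_x x hx])
          rw [hsum_ta, hsum_as', hcount_a]
          push_cast
          ring
        · rw [if_neg (asymm hab), if_pos hab]
          have hne : ∀ x ∈ a :: as, b < x := by
            intro x hx
            rcases List.mem_cons.1 hx with rfl | hx
            · exact hab
            · exact lt_of_lt_of_le hab (ha'.1 x hx)
          have hrec := ih ((a :: as).length + bs.length) (by simp at hn ⊢; omega)
            (a :: as) bs rfl ha hb'.2
          rw [hrec]
          congr 2
          apply List.map_congr_left
          intro x hx
          have : (b :: bs).count x = bs.count x := by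
            rw [List.count_cons]
            simp [ne_of_lt (hne x hx)]
          rw [this]

-- ===== VERDICT (by name: the statement is the Claim_ definition above) =====
theorem GenreSearch_spec : Claim_equal_GenreSearch := by
  intro libGenre inGenre _
  unfold Spec_GenreSearch GenreSearch GenreSearch_alt
  dsimp only
  -- A's nested loops = 2 * Σ over the input tokens of the library match count
  simp only [inner_loop_eq_count]
  rw [PySem.List.foldl_add, List.sum_map_mul_left, zero_add]
  -- B: the merge over the two sorted lists is 2 * the same sum
  have h1 : (PySem.List.sorted ((pySplitSlash inGenre).map PySem.Str.lower)
      (fun x => x) false).Pairwise (· ≤ ·) := by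
    simpa using PySem.List.sorted_pairwise
      (xs := (pySplitSlash inGenre).map PySem.Str.lower) (key := fun x => x)
  have h2 : (PySem.List.sorted ((pySplitSlash libGenre).map PySem.Str.lower)
      (fun x => x) false).Pairwise (· ≤ ·) := by
    simpa using PySem.List.sorted_pairwise
      (xs := (pySplitSlash libGenre).map PySem.Str.lower) (key := fun x => x)
  rw [mergeScore_eq_sum ((PySem.List.sorted ((pySplitSlash inGenre).map PySem.Str.lower)
        (fun x => x) false).length
      + (PySem.List.sorted ((pySplitSlash libGenre).map PySem.Str.lower)
        (fun x => x) false).length) _ _ rfl h1 h2]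
  congr 1
  have hpa := PySem.List.sorted_perm ((pySplitSlash inGenre).map PySem.Str.lower) (fun x => x) false
  have hpb := PySem.List.sorted_perm ((pySplitSlash libGenre).map PySem.Str.lower) (fun x => x) false
  rw [(hpa.map _).sum_eq, List.map_map]
  apply congrArg
  apply List.map_congr_left
  intro t _
  simp only [Function.comp_apply]
  rw [hpb.count_eq]
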